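-- pv_equiv track=rewrite | github.com/mlevitan96-crypto/stock-bot | telemetry/alpaca_strict_completeness_gate.py | _expand_canonical_aliases
-- ===== SOURCE A (Python) =====
-- from typing import Any, Dict, List, Optional, Set
--
-- def _expand_canonical_aliases(seed_ids: Set[str], intent_to_fill: Dict[str, str]) -> Set[str]:
--     """Closure of seed IDs with undirected intent<->fill edges from canonical_trade_id_resolved."""
--     s = {x for x in seed_ids if x}
--     if not intent_to_fill:
--         return s
--     changed = True
--     while changed:
--         changed = False
--         for intent_id, fill_id in intent_to_fill.items():
--             if intent_id in s and fill_id not in s: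
--                 s.add(fill_id)
--                 changed = True
--             elif fill_id in s and intent_id not in s:
--                 s.add(intent_id)
--                 changed = True
--     return s
-- ===== SOURCE B (Python) =====
-- def _expand_canonical_aliases(seed_ids, intent_to_fill):
--     """Closure of seed IDs with undirected intent<->fill edges from canonical_trade_id_resolved."""
--     s = {x for x in seed_ids if x}
--     adj = {}
--     for intent_id, fill_id in intent_to_fill.items():
--         adj.setdefault(intent_id, []).append(fill_id)
--         adj.setdefault(fill_id, []).append(intent_id)
--     stack = [x for x in seed_ids if x]
--     while stack:
--         v = stack.pop()
--         for w in adj.get(v, []):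
--             if w not in s:
--                 s.add(w)
--                 stack.append(w)
--     return s
-- ===== Notes on version B (the rewrite author's own statement) =====
-- stated objective: alternative
-- what changed: A repeatedly rescans the whole edge list until a full pass adds nothing; B builds an undirected adjacency map once and runs a single stack-based DFS from the seeds, visiting each vertex and edge a bounded number of times.
import Mathlib
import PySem

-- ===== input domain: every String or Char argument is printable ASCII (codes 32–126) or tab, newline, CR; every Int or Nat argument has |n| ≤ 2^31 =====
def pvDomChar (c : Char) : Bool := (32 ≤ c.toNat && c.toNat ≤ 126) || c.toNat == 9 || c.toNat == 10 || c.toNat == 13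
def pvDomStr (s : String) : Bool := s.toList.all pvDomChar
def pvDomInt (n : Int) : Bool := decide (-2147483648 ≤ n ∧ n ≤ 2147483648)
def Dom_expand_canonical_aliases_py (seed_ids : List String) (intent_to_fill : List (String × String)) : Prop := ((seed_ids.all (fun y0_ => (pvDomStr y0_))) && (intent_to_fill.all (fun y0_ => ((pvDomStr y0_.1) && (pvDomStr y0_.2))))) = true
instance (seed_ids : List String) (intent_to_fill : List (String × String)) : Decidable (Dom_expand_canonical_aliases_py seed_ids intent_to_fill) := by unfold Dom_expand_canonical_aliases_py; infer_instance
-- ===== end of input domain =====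

-- B replaces A's repeated full rescans of the edge list (until a pass adds nothing) by an adjacency
-- map built once plus a single stack-based DFS from the seeds (objective: alternative algorithm).
-- The Python function returns a SET (unordered; set iteration order is not modelled), so both ports
-- return the canonical sorted list of the resulting set's distinct elements.

-- ===== PORT A =====
-- body of A's inner `for intent_id, fill_id in intent_to_fill.items():`, threading (s, changed)
def pvStepA (sc : PySem.Set String × Bool) (e : String × String) : PySem.Set String × Bool :=
  if PySem.Set.contains sc.1 e.1 && !(PySem.Set.contains sc.1 e.2) then
    (PySem.Set.add sc.1 e.2, true)
  else if PySem.Set.contains sc.1 e.2 && !(PySem.Set.contains sc.1 e.1) then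
    (PySem.Set.add sc.1 e.1, true)
  else sc

-- A's `while changed:` loop; the fuel only makes it total (every repeated pass adds at least one
-- endpoint, so 2*|edges|+1 passes always suffice)
def pvLoopA (edges : List (String × String)) : Nat → PySem.Set String → PySem.Set String
  | 0, s => s
  | fuel + 1, s =>
    let sc := edges.foldl pvStepA (s, false)
    if sc.2 then pvLoopA edges fuel sc.1 else sc.1

def expand_canonical_aliases_py (seed_ids : List String) (intent_to_fill : List (String × String)) : List String :=
  let s := PySem.Set.ofList (seed_ids.filter (fun x => x ≠ ""))
  let r := if intent_to_fill = [] then s else pvLoopA intent_to_fill (2 * intent_to_fill.length + 1) s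
  PySem.List.sorted r (fun x => x) false  -- canonical list of the unordered Python set

-- ===== PORT B =====
-- B's adjacency loop: `adj.setdefault(a, []).append(b); adj.setdefault(b, []).append(a)`
def pvAdj (edges : List (String × String)) : PySem.Dict String (List String) :=
  edges.foldl (fun d e =>
      PySem.Dict.modify (PySem.Dict.modify d e.1 [] (fun l => l ++ [e.2])) e.2 [] (fun l => l ++ [e.1]))
    PySem.Dict.empty

-- body of B's inner `for w in adj.get(v, []): if w not in s: s.add(w); stack.append(w)`
def pvVisit (p : PySem.Set String × List String) (w : String) : PySem.Set String × List String :=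
  if PySem.Set.contains p.1 w then p else (PySem.Set.add p.1 w, p.2 ++ [w])

-- B's `while stack:` DFS loop (`v = stack.pop()` pops from the end); the fuel only makes it total
-- (each iteration pops once and every push adds a new endpoint, so the measure below shrinks)
def pvDFS (adj : PySem.Dict String (List String)) : Nat → PySem.Set String → List String → PySem.Set String
  | 0, s, _ => s
  | fuel + 1, s, stack =>
    match stack.getLast? with
    | none => s
    | some v =>
      let p := (PySem.Dict.getD adj v []).foldl pvVisit (s, stack.dropLast)
      pvDFS adj fuel p.1 p.2

def expand_canonical_aliases_py_alt (seed_ids : List String) (intent_to_fill : List (String × String)) : List String :=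
  let s := PySem.Set.ofList (seed_ids.filter (fun x => x ≠ ""))
  let adj := pvAdj intent_to_fill
  let stack := seed_ids.filter (fun x => x ≠ "")
  let r := pvDFS adj (seed_ids.length + 4 * intent_to_fill.length + 1) s stack
  PySem.List.sorted r (fun x => x) false  -- canonical list of the unordered Python set

-- ===== PRECONDITION & SPEC =====
def Spec_expand_canonical_aliases_py (seed_ids : List String) (intent_to_fill : List (String × String)) (out : List String) : Prop := out = expand_canonical_aliases_py_alt seed_ids intent_to_fill
instance (seed_ids : List String) (intent_to_fill : List (String × String)) (out : List String) : Decidable (Spec_expand_canonical_aliases_py seed_ids intent_to_fill out) := by unfold Spec_expand_canonical_aliases_py; infer_instance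

-- ===== CLAIM (what is proved, stated in full; the proofs are below) =====
def Claim_equal_expand_canonical_aliases_py : Prop := ∀ (seed_ids : List String) (intent_to_fill : List (String × String)), Dom_expand_canonical_aliases_py seed_ids intent_to_fill → Spec_expand_canonical_aliases_py seed_ids intent_to_fill (expand_canonical_aliases_py seed_ids intent_to_fill)

-- ===== LEMMAS AND PROOFS =====

-- undirected reachability from the (filtered) seeds over the alias edges: the set both programs compute
inductive pvReach (seeds : List String) (edges : List (String × String)) : String → Prop
  | seed (x : String) : x ∈ seeds → pvReach seeds edges x
  | fwd (a b : String) : pvReach seeds edges a → (a, b) ∈ edges → pvReach seeds edges b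
  | bwd (a b : String) : pvReach seeds edges b → (a, b) ∈ edges → pvReach seeds edges a

-- an edge fires on s when exactly one of its endpoints is in s
def pvFires (s : PySem.Set String) (e : String × String) : Bool :=
  (PySem.Set.contains s e.1 && !(PySem.Set.contains s e.2)) ||
  (PySem.Set.contains s e.2 && !(PySem.Set.contains s e.1))

-- the one-edge update A performs on s
def pvRelax (s : PySem.Set String) (e : String × String) : PySem.Set String :=
  if PySem.Set.contains s e.1 && !(PySem.Set.contains s e.2) then PySem.Set.add s e.2
  else if PySem.Set.contains s e.2 && !(PySem.Set.contains s e.1) then PySem.Set.add s e.1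
  else s

-- number of edge endpoints (with multiplicity) not yet in s: the progress measure
def pvMissing (edges : List (String × String)) (s : PySem.Set String) : Nat :=
  (edges.flatMap (fun e => [e.1, e.2])).countP (fun x => !(PySem.Set.contains s x))

-- s is a fixpoint of A's pass
def pvClosed (edges : List (String × String)) (s : PySem.Set String) : Prop :=
  ∀ e ∈ edges, pvFires s e = false

theorem pvMemOfList (xs : List String) (x : String) : x ∈ PySem.Set.ofList xs ↔ x ∈ xs := by
  simp [PySem.Set.mem_ofList]

theorem pvVisit_pos (s : PySem.Set String) (st : List String) (w : String) (h : w ∈ s) :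
    pvVisit (s, st) w = (s, st) := by simp [pvVisit, h]

theorem pvVisit_neg (s : PySem.Set String) (st : List String) (w : String) (h : w ∉ s) :
    pvVisit (s, st) w = (PySem.Set.add s w, st ++ [w]) := by simp [pvVisit, h]

theorem pvStepA_relax (s : PySem.Set String) (c : Bool) (e : String × String) :
    pvStepA (s, c) e = (pvRelax s e, c || pvFires s e) := by
  by_cases h1 : e.1 ∈ s <;> by_cases h2 : e.2 ∈ s <;>
    simp [pvStepA, pvRelax, pvFires, h1, h2]

theorem pvRelax_of_not_fires (s : PySem.Set String) (e : String × String)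
    (h : pvFires s e = false) : pvRelax s e = s := by
  by_cases h1 : e.1 ∈ s <;> by_cases h2 : e.2 ∈ s
  · simp [pvRelax, h1, h2]
  · exfalso; simp [pvFires, h1, h2] at h
  · exfalso; simp [pvFires, h1, h2] at h
  · simp [pvRelax, h1, h2]

theorem pvRelax_sub (s : PySem.Set String) (e : String × String) (x : String) (hx : x ∈ s) :
    x ∈ pvRelax s e := by
  unfold pvRelax; split_ifs <;> simp [PySem.Set.mem_add, hx]

theorem pvRelax_nodup (s : PySem.Set String) (e : String × String) (h : s.Nodup) :
    (pvRelax s e).Nodup := by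
  unfold pvRelax; split_ifs <;> first | exact PySem.Set.nodup_add _ _ h | exact h

theorem pvRelax_sound (seeds : List String) (edges : List (String × String))
    (s : PySem.Set String) (e : String × String) (he : e ∈ edges)
    (hs : ∀ x ∈ s, pvReach seeds edges x) :
    ∀ x ∈ pvRelax s e, pvReach seeds edges x := by
  intro x hx
  unfold pvRelax at hx
  split_ifs at hx with h1 h2
  · simp only [Bool.and_eq_true, Bool.not_eq_true'] at h1
    rcases (PySem.Set.mem_add s e.2 x).mp hx with hxs | rfl
    · exact hs x hxs
    · exact pvReach.fwd e.1 e.2 (hs e.1 (by simpa using h1.1)) (by simpa using he)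
  · simp only [Bool.and_eq_true, Bool.not_eq_true'] at h2
    rcases (PySem.Set.mem_add s e.1 x).mp hx with hxs | rfl
    · exact hs x hxs
    · exact pvReach.bwd e.1 e.2 (hs e.2 (by simpa using h2.1)) (by simpa using he)
  · exact hs x hx

theorem pvFold_sub (l : List (String × String)) (s : PySem.Set String) (c : Bool)
    (x : String) (hx : x ∈ s) : x ∈ (l.foldl pvStepA (s, c)).1 := by
  induction l generalizing s c with
  | nil => exact hx
  | cons e t ih =>
    rw [List.foldl_cons, pvStepA_relax]
    exact ih _ _ (pvRelax_sub s e x hx)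

theorem pvFold_nodup (l : List (String × String)) (s : PySem.Set String) (c : Bool)
    (h : s.Nodup) : (l.foldl pvStepA (s, c)).1.Nodup := by
  induction l generalizing s c with
  | nil => exact h
  | cons e t ih =>
    rw [List.foldl_cons, pvStepA_relax]
    exact ih _ _ (pvRelax_nodup s e h)

theorem pvFold_sound (seeds : List String) (edges : List (String × String))
    (l : List (String × String)) (s : PySem.Set String) (c : Bool)
    (hl : ∀ e ∈ l, e ∈ edges) (hs : ∀ x ∈ s, pvReach seeds edges x) :
    ∀ x ∈ (l.foldl pvStepA (s, c)).1, pvReach seeds edges x := by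
  induction l generalizing s c with
  | nil => exact hs
  | cons e t ih =>
    rw [List.foldl_cons, pvStepA_relax]
    exact ih _ _ (fun e' he' => hl e' (List.mem_cons_of_mem _ he'))
      (pvRelax_sound seeds edges s e (hl e (List.mem_cons_self ..)) hs)

theorem pvLoopA_sub (edges : List (String × String)) (fuel : Nat) (s : PySem.Set String)
    (x : String) (hx : x ∈ s) : x ∈ pvLoopA edges fuel s := by
  induction fuel generalizing s with
  | zero => exact hx
  | succ f ih =>
    show x ∈ (if (edges.foldl pvStepA (s, false)).2 then
        pvLoopA edges f (edges.foldl pvStepA (s, false)).1 else (edges.foldl pvStepA (s, false)).1)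
    split_ifs
    · exact ih _ (pvFold_sub edges s false x hx)
    · exact pvFold_sub edges s false x hx

theorem pvLoopA_nodup (edges : List (String × String)) (fuel : Nat) (s : PySem.Set String)
    (h : s.Nodup) : (pvLoopA edges fuel s).Nodup := by
  induction fuel generalizing s with
  | zero => exact h
  | succ f ih =>
    show (if (edges.foldl pvStepA (s, false)).2 then
        pvLoopA edges f (edges.foldl pvStepA (s, false)).1 else (edges.foldl pvStepA (s, false)).1).Nodup
    split_ifs
    · exact ih _ (pvFold_nodup edges s false h)
    · exact pvFold_nodup edges s false h

theorem pvLoopA_sound (seeds : List String) (edges : List (String × String)) (fuel : Nat)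
    (s : PySem.Set String) (hs : ∀ x ∈ s, pvReach seeds edges x) :
    ∀ x ∈ pvLoopA edges fuel s, pvReach seeds edges x := by
  induction fuel generalizing s with
  | zero => exact hs
  | succ f ih =>
    intro x hx
    have hx' : x ∈ (if (edges.foldl pvStepA (s, false)).2 then
        pvLoopA edges f (edges.foldl pvStepA (s, false)).1 else (edges.foldl pvStepA (s, false)).1) := hx
    have hsound := pvFold_sound seeds edges edges s false (fun _ he => he) hs
    split_ifs at hx'
    · exact ih _ hsound x hx'
    · exact hsound x hx'

theorem pvFlagTrue (l : List (String × String)) (s : PySem.Set String) :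
    (l.foldl pvStepA (s, true)).2 = true := by
  induction l generalizing s with
  | nil => rfl
  | cons e t ih => rw [List.foldl_cons, pvStepA_relax]; simpa using ih _

theorem pvFoldFalse (l : List (String × String)) (s : PySem.Set String)
    (h : (l.foldl pvStepA (s, false)).2 = false) :
    (l.foldl pvStepA (s, false)).1 = s ∧ ∀ e ∈ l, pvFires s e = false := by
  induction l generalizing s with
  | nil => exact ⟨rfl, by simp⟩
  | cons e t ih =>
    rw [List.foldl_cons, pvStepA_relax, Bool.false_or] at h ⊢
    by_cases hf : pvFires s e = true
    · rw [hf] at h; rw [pvFlagTrue] at h; exact absurd h (by simp)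
    · have hf' : pvFires s e = false := by simpa using hf
      rw [hf', pvRelax_of_not_fires s e hf'] at h ⊢
      obtain ⟨h1, h2⟩ := ih s h
      exact ⟨h1, fun e' he' => by
        rcases List.mem_cons.mp he' with rfl | ht
        · exact hf'
        · exact h2 e' ht⟩

theorem pvMissing_mono (edges : List (String × String)) (s s' : PySem.Set String)
    (h : ∀ x ∈ s, x ∈ s') : pvMissing edges s' ≤ pvMissing edges s := by
  refine List.countP_mono_left (fun x _ hx => ?_)
  simp only [Bool.not_eq_true'] at hx ⊢
  have : x ∉ s' := by simpa using hx
  have : x ∉ s := fun hxs => this (h x hxs)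
  simpa using this

theorem pvCountP_lt {α : Type} (l : List α) (q q' : α → Bool) (x : α) (hx : x ∈ l)
    (hq : q x = true) (hq' : q' x = false) (hmono : ∀ y, q' y = true → q y = true) :
    l.countP q' < l.countP q := by
  induction l with
  | nil => exact absurd hx (List.not_mem_nil)
  | cons y t ih =>
    rw [List.countP_cons, List.countP_cons]
    have hle : t.countP q' ≤ t.countP q := List.countP_mono_left (fun a _ ha => hmono a ha)
    rcases List.mem_cons.mp hx with rfl | hxt
    · rw [hq, hq']; simpa using Nat.lt_succ_of_le hle
    · have : (if q' y = true then 1 else 0) ≤ (if q y = true then 1 else 0) := by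
        by_cases hy : q' y = true
        · rw [if_pos hy, if_pos (hmono y hy)]
        · simp [hy]
      have := ih hxt
      omega

-- adding a still-missing endpoint strictly decreases the measure
theorem pvMissing_add_lt (edges : List (String × String)) (s : PySem.Set String) (w : String)
    (hw : w ∈ edges.flatMap (fun e => [e.1, e.2])) (hws : w ∉ s) :
    pvMissing edges (PySem.Set.add s w) < pvMissing edges s := by
  refine pvCountP_lt _ _ _ w hw (by simpa using hws)
    (by simpa using (PySem.Set.mem_add s w w).mpr (Or.inr rfl)) ?_
  intro y hy
  simp only [Bool.not_eq_true'] at hy ⊢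
  have hmemadd : y ∉ PySem.Set.add s w := by simpa using hy
  have hns : y ∉ s := fun hys => hmemadd ((PySem.Set.mem_add s w y).mpr (Or.inl hys))
  simpa using hns

theorem pvMissing_relax_lt (edges : List (String × String)) (s : PySem.Set String)
    (e : String × String) (he : e ∈ edges) (hf : pvFires s e = true) :
    pvMissing edges (pvRelax s e) < pvMissing edges s := by
  simp only [pvFires, Bool.or_eq_true, Bool.and_eq_true, Bool.not_eq_true'] at hf
  rcases hf with ⟨h1, h2⟩ | ⟨h1, h2⟩
  · have m1 : e.1 ∈ s := by simpa using h1
    have m2 : e.2 ∉ s := by simpa using h2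
    have hrel : pvRelax s e = PySem.Set.add s e.2 := by simp [pvRelax, m1, m2]
    rw [hrel]
    exact pvMissing_add_lt edges s e.2 (List.mem_flatMap.mpr ⟨e, he, by simp⟩) m2
  · have m1 : e.2 ∈ s := by simpa using h1
    have m2 : e.1 ∉ s := by simpa using h2
    have hrel : pvRelax s e = PySem.Set.add s e.1 := by simp [pvRelax, m1, m2]
    rw [hrel]
    exact pvMissing_add_lt edges s e.1 (List.mem_flatMap.mpr ⟨e, he, by simp⟩) m2

theorem pvFoldTrueDec (edges : List (String × String)) (l : List (String × String))
    (s : PySem.Set String) (hl : ∀ e ∈ l, e ∈ edges)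
    (h : (l.foldl pvStepA (s, false)).2 = true) :
    pvMissing edges (l.foldl pvStepA (s, false)).1 < pvMissing edges s := by
  induction l generalizing s with
  | nil => exact absurd h (by simp [List.foldl_nil])
  | cons e t ih =>
    rw [List.foldl_cons, pvStepA_relax, Bool.false_or] at h ⊢
    by_cases hf : pvFires s e = true
    · rw [hf]
      have hsub : ∀ x ∈ pvRelax s e, x ∈ (t.foldl pvStepA (pvRelax s e, true)).1 :=
        fun x hx => pvFold_sub t _ true x hx
      calc pvMissing edges (t.foldl pvStepA (pvRelax s e, true)).1
          ≤ pvMissing edges (pvRelax s e) := pvMissing_mono edges _ _ hsub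
        _ < pvMissing edges s := pvMissing_relax_lt edges s e (hl e (List.mem_cons_self ..)) hf
    · have hf' : pvFires s e = false := by simpa using hf
      rw [hf', pvRelax_of_not_fires s e hf'] at h ⊢
      exact ih s (fun e' he' => hl e' (List.mem_cons_of_mem _ he')) h

theorem pvLoopA_closed (edges : List (String × String)) :
    ∀ (fuel : Nat) (s : PySem.Set String), pvMissing edges s < fuel →
      pvClosed edges (pvLoopA edges fuel s) := by
  intro fuel
  induction fuel with
  | zero => intro s h; omega
  | succ f ih =>
    intro s h
    show pvClosed edges (if (edges.foldl pvStepA (s, false)).2 then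
        pvLoopA edges f (edges.foldl pvStepA (s, false)).1 else (edges.foldl pvStepA (s, false)).1)
    by_cases h2 : (edges.foldl pvStepA (s, false)).2 = true
    · rw [if_pos h2]
      have := pvFoldTrueDec edges edges s (fun _ he => he) h2
      exact ih _ (by omega)
    · rw [if_neg h2]
      obtain ⟨h1, hall⟩ := pvFoldFalse edges s (by simpa using h2)
      rw [h1]
      exact hall

theorem pvClosed_complete (seeds : List String) (edges : List (String × String))
    (s : PySem.Set String) (hc : pvClosed edges s) (hseed : ∀ x ∈ seeds, x ∈ s) :
    ∀ x, pvReach seeds edges x → x ∈ s := by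
  intro x hx
  induction hx with
  | seed x hx => exact hseed x hx
  | fwd a b _ he ih =>
    by_contra hb
    have := hc (a, b) he
    simp [pvFires, ih, hb] at this
  | bwd a b _ he ih =>
    by_contra ha
    have := hc (a, b) he
    simp [pvFires, ih, ha] at this

theorem pvFlatLen (edges : List (String × String)) :
    (edges.flatMap (fun e => [e.1, e.2])).length = 2 * edges.length := by
  induction edges with
  | nil => rfl
  | cons e t ih => simp [List.flatMap_cons, ih]; omega

theorem pvMissing_le (edges : List (String × String)) (s : PySem.Set String) :
    pvMissing edges s ≤ 2 * edges.length := by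
  calc pvMissing edges s ≤ (edges.flatMap (fun e => [e.1, e.2])).length := List.countP_le_length
    _ = 2 * edges.length := pvFlatLen edges

-- A's result (before the final branch) contains exactly the reachable IDs
theorem pvA_char (seeds : List String) (edges : List (String × String)) :
    let r := if edges = [] then PySem.Set.ofList seeds
             else pvLoopA edges (2 * edges.length + 1) (PySem.Set.ofList seeds)
    (∀ x, x ∈ r ↔ pvReach seeds edges x) ∧ r.Nodup := by
  intro r
  have hs0 : ∀ x ∈ PySem.Set.ofList seeds, pvReach seeds edges x :=
    fun x hx => pvReach.seed x ((pvMemOfList seeds x).mp hx)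
  have hclosed : pvClosed edges r := by
    by_cases h : edges = []
    · intro e he; rw [h] at he; exact absurd he (List.not_mem_nil)
    · show pvClosed edges (if edges = [] then _ else _)
      rw [if_neg h]
      exact pvLoopA_closed edges _ _ (by have := pvMissing_le edges (PySem.Set.ofList seeds); omega)
  have hsub : ∀ x ∈ PySem.Set.ofList seeds, x ∈ r := by
    by_cases h : edges = [] <;> simp only [r, h, reduceIte]
    · exact fun x hx => hx
    · exact fun x hx => pvLoopA_sub edges _ _ x hx
  constructor
  · intro x
    constructor
    · intro hx
      by_cases h : edges = []
      · rw [show r = PySem.Set.ofList seeds by simp [r, h]] at hx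
        exact hs0 x hx
      · rw [show r = pvLoopA edges (2 * edges.length + 1) (PySem.Set.ofList seeds) by simp [r, h]] at hx
        exact pvLoopA_sound seeds edges _ _ hs0 x hx
    · intro hx
      exact pvClosed_complete seeds edges r hclosed
        (fun y hy => hsub y ((pvMemOfList seeds y).mpr hy)) x hx
  · by_cases h : edges = []
    · rw [show r = PySem.Set.ofList seeds by simp [r, h]]
      exact PySem.Set.nodup_ofList seeds
    · rw [show r = pvLoopA edges (2 * edges.length + 1) (PySem.Set.ofList seeds) by simp [r, h]]
      exact pvLoopA_nodup edges _ _ (PySem.Set.nodup_ofList seeds)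

-- ===== B-side lemmas =====

-- membership in the adjacency map: w is a neighbour of v iff some edge joins them
theorem pvAdj_fold_mem (l : List (String × String)) (d : PySem.Dict String (List String))
    (v w : String) :
    w ∈ PySem.Dict.getD (l.foldl (fun d e =>
        PySem.Dict.modify (PySem.Dict.modify d e.1 [] (fun l => l ++ [e.2])) e.2 [] (fun l => l ++ [e.1])) d) v [] ↔
      w ∈ PySem.Dict.getD d v [] ∨ (v, w) ∈ l ∨ (w, v) ∈ l := by
  induction l generalizing d with
  | nil => simp
  | cons e t ih =>
    rw [List.foldl_cons, ih]
    have hstep : w ∈ PySem.Dict.getD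
        (PySem.Dict.modify (PySem.Dict.modify d e.1 [] (fun l => l ++ [e.2])) e.2 [] (fun l => l ++ [e.1])) v [] ↔
        w ∈ PySem.Dict.getD d v [] ∨ (v = e.1 ∧ w = e.2) ∨ (v = e.2 ∧ w = e.1) := by
      simp only [PySem.Dict.getD_modify]
      split_ifs <;> simp_all [List.mem_append]
    rw [hstep]
    constructor
    · rintro ((hd | ⟨rfl, rfl⟩ | ⟨rfl, rfl⟩) | ht | ht)
      · exact Or.inl hd
      · exact Or.inr (Or.inl (List.mem_cons_self ..))
      · exact Or.inr (Or.inr (List.mem_cons_self ..))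
      · exact Or.inr (Or.inl (List.mem_cons_of_mem _ ht))
      · exact Or.inr (Or.inr (List.mem_cons_of_mem _ ht))
    · rintro (hd | hvw | hwv)
      · exact Or.inl (Or.inl hd)
      · rcases List.mem_cons.mp hvw with h | ht
        · exact Or.inl (Or.inr (Or.inl ⟨congrArg Prod.fst h, congrArg Prod.snd h⟩))
        · exact Or.inr (Or.inl ht)
      · rcases List.mem_cons.mp hwv with h | ht
        · exact Or.inl (Or.inr (Or.inr ⟨congrArg Prod.snd h, congrArg Prod.fst h⟩))
        · exact Or.inr (Or.inr ht)

theorem pvAdj_mem (edges : List (String × String)) (v w : String) :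
    w ∈ PySem.Dict.getD (pvAdj edges) v [] ↔ (v, w) ∈ edges ∨ (w, v) ∈ edges := by
  unfold pvAdj
  rw [pvAdj_fold_mem]
  simp

theorem pvAdj_endpoint (edges : List (String × String)) (v w : String)
    (h : w ∈ PySem.Dict.getD (pvAdj edges) v []) :
    w ∈ edges.flatMap (fun e => [e.1, e.2]) := by
  rcases (pvAdj_mem edges v w).mp h with he | he
  · exact List.mem_flatMap.mpr ⟨(v, w), he, by simp⟩
  · exact List.mem_flatMap.mpr ⟨(w, v), he, by simp⟩

-- facts about the inner neighbour loop
theorem pvVisit_mem1 (nbrs : List String) (s : PySem.Set String) (st : List String)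
    (x : String) (hx : x ∈ s) : x ∈ (nbrs.foldl pvVisit (s, st)).1 := by
  induction nbrs generalizing s st with
  | nil => exact hx
  | cons w t ih =>
    by_cases hw : w ∈ s
    · rw [List.foldl_cons, pvVisit_pos s st w hw]; exact ih s st hx
    · rw [List.foldl_cons, pvVisit_neg s st w hw]
      exact ih _ _ ((PySem.Set.mem_add s w x).mpr (Or.inl hx))

theorem pvVisit_mem2 (nbrs : List String) (s : PySem.Set String) (st : List String)
    (x : String) (hx : x ∈ (nbrs.foldl pvVisit (s, st)).1) : x ∈ s ∨ x ∈ nbrs := by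
  induction nbrs generalizing s st with
  | nil => exact Or.inl hx
  | cons w t ih =>
    by_cases hw : w ∈ s
    · rw [List.foldl_cons, pvVisit_pos s st w hw] at hx
      rcases ih s st hx with h | h
      · exact Or.inl h
      · exact Or.inr (List.mem_cons_of_mem _ h)
    · rw [List.foldl_cons, pvVisit_neg s st w hw] at hx
      rcases ih _ _ hx with h | h
      · rcases (PySem.Set.mem_add s w x).mp h with h' | rfl
        · exact Or.inl h'
        · exact Or.inr (List.mem_cons_self ..)
      · exact Or.inr (List.mem_cons_of_mem _ h)

theorem pvVisit_nbrs (nbrs : List String) (s : PySem.Set String) (st : List String) :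
    ∀ w ∈ nbrs, w ∈ (nbrs.foldl pvVisit (s, st)).1 := by
  induction nbrs generalizing s st with
  | nil => intro w hw; exact absurd hw (List.not_mem_nil)
  | cons w t ih =>
    intro w' hw'
    by_cases hw : w ∈ s
    · rw [List.foldl_cons, pvVisit_pos s st w hw]
      rcases List.mem_cons.mp hw' with rfl | ht
      · exact pvVisit_mem1 t s st w' hw
      · exact ih s st w' ht
    · rw [List.foldl_cons, pvVisit_neg s st w hw]
      rcases List.mem_cons.mp hw' with rfl | ht
      · exact pvVisit_mem1 t _ _ w' ((PySem.Set.mem_add s w' w').mpr (Or.inr rfl))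
      · exact ih _ _ w' ht

theorem pvVisit_st1 (nbrs : List String) (s : PySem.Set String) (st : List String)
    (x : String) (hx : x ∈ st) : x ∈ (nbrs.foldl pvVisit (s, st)).2 := by
  induction nbrs generalizing s st with
  | nil => exact hx
  | cons w t ih =>
    by_cases hw : w ∈ s
    · rw [List.foldl_cons, pvVisit_pos s st w hw]; exact ih s st hx
    · rw [List.foldl_cons, pvVisit_neg s st w hw]
      exact ih _ _ (List.mem_append_left _ hx)

theorem pvVisit_st2 (nbrs : List String) (s : PySem.Set String) (st : List String)
    (x : String) (hx : x ∈ (nbrs.foldl pvVisit (s, st)).2) :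
    x ∈ st ∨ x ∈ (nbrs.foldl pvVisit (s, st)).1 := by
  induction nbrs generalizing s st with
  | nil => exact Or.inl hx
  | cons w t ih =>
    by_cases hw : w ∈ s
    · rw [List.foldl_cons, pvVisit_pos s st w hw] at hx ⊢
      exact ih s st hx
    · rw [List.foldl_cons, pvVisit_neg s st w hw] at hx ⊢
      rcases ih _ _ hx with h | h
      · rcases List.mem_append.mp h with h' | h'
        · exact Or.inl h'
        · rw [List.mem_singleton.mp h']
          exact Or.inr (pvVisit_mem1 t _ _ w ((PySem.Set.mem_add s w w).mpr (Or.inr rfl)))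
      · exact Or.inr h

theorem pvVisit_new (nbrs : List String) (s : PySem.Set String) (st : List String)
    (x : String) (hx : x ∈ (nbrs.foldl pvVisit (s, st)).1) :
    x ∈ s ∨ x ∈ (nbrs.foldl pvVisit (s, st)).2 := by
  induction nbrs generalizing s st with
  | nil => exact Or.inl hx
  | cons w t ih =>
    by_cases hw : w ∈ s
    · rw [List.foldl_cons, pvVisit_pos s st w hw] at hx ⊢
      exact ih s st hx
    · rw [List.foldl_cons, pvVisit_neg s st w hw] at hx ⊢
      rcases ih _ _ hx with h | h
      · rcases (PySem.Set.mem_add s w x).mp h with h' | rfl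
        · exact Or.inl h'
        · exact Or.inr (pvVisit_st1 t _ _ x (List.mem_append_right _ (List.mem_singleton.mpr rfl)))
      · exact Or.inr h

theorem pvVisit_nodup (nbrs : List String) (s : PySem.Set String) (st : List String)
    (h : s.Nodup) : (nbrs.foldl pvVisit (s, st)).1.Nodup := by
  induction nbrs generalizing s st with
  | nil => exact h
  | cons w t ih =>
    by_cases hw : w ∈ s
    · rw [List.foldl_cons, pvVisit_pos s st w hw]; exact ih s st h
    · rw [List.foldl_cons, pvVisit_neg s st w hw]
      exact ih _ _ (PySem.Set.nodup_add _ _ h)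

theorem pvVisit_measure (edges : List (String × String)) (nbrs : List String)
    (s : PySem.Set String) (st : List String)
    (hend : ∀ w ∈ nbrs, w ∈ edges.flatMap (fun e => [e.1, e.2])) :
    (nbrs.foldl pvVisit (s, st)).2.length + 2 * pvMissing edges (nbrs.foldl pvVisit (s, st)).1 ≤
      st.length + 2 * pvMissing edges s := by
  induction nbrs generalizing s st with
  | nil => exact le_refl _
  | cons w t ih =>
    by_cases hw : w ∈ s
    · rw [List.foldl_cons, pvVisit_pos s st w hw]
      exact ih s st (fun w' hw' => hend w' (List.mem_cons_of_mem _ hw'))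
    · rw [List.foldl_cons, pvVisit_neg s st w hw]
      have hdec := pvMissing_add_lt edges s w (hend w (List.mem_cons_self ..)) hw
      have := ih (PySem.Set.add s w) (st ++ [w]) (fun w' hw' => hend w' (List.mem_cons_of_mem _ hw'))
      simp only [List.length_append, List.length_cons, List.length_nil] at this
      omega

-- the main DFS invariant: from a sound state the loop empties the stack within the fuel and
-- returns a superset of s that is sound, duplicate-free and closed under the adjacency map
theorem pvDFS_main (seeds : List String) (edges : List (String × String)) :
    ∀ (fuel : Nat) (s : PySem.Set String) (stack : List String),
      stack.length + 2 * pvMissing edges s < fuel →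
      (∀ x ∈ s, pvReach seeds edges x) →
      (∀ x ∈ stack, x ∈ s) →
      s.Nodup →
      (∀ v ∈ s, v ∉ stack → ∀ w ∈ PySem.Dict.getD (pvAdj edges) v [], w ∈ s) →
      (∀ x ∈ s, x ∈ pvDFS (pvAdj edges) fuel s stack) ∧
      (∀ x ∈ pvDFS (pvAdj edges) fuel s stack, pvReach seeds edges x) ∧
      (pvDFS (pvAdj edges) fuel s stack).Nodup ∧
      (∀ v ∈ pvDFS (pvAdj edges) fuel s stack,
        ∀ w ∈ PySem.Dict.getD (pvAdj edges) v [], w ∈ pvDFS (pvAdj edges) fuel s stack) := by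
  intro fuel
  induction fuel with
  | zero => intro s stack h; omega
  | succ f ih =>
    intro s stack hfuel hsound hsub hnodup hinv
    cases hstack : stack.getLast? with
    | none =>
      have hnil : stack = [] := List.getLast?_eq_none_iff.mp hstack
      subst hnil
      have hr : pvDFS (pvAdj edges) (f + 1) s [] = s := by simp [pvDFS]
      rw [hr]
      exact ⟨fun x hx => hx, hsound, hnodup,
        fun v hv w hw => hinv v hv (List.not_mem_nil) w hw⟩
    | some v =>
      have hne : stack ≠ [] := by
        intro h; rw [h] at hstack; simp at hstack
      have hdecomp : stack.dropLast ++ [v] = stack := by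
        rw [List.getLast?_eq_some_getLast hne, Option.some_inj] at hstack
        rw [← hstack]
        exact List.dropLast_append_getLast hne
      have hvstack : v ∈ stack := by
        rw [← hdecomp]; exact List.mem_append_right _ (List.mem_singleton.mpr rfl)
      have hvs : v ∈ s := hsub v hvstack
      have hRv : pvReach seeds edges v := hsound v hvs
      have hlen : stack.length = stack.dropLast.length + 1 := by
        conv_lhs => rw [← hdecomp]
        rw [List.length_append, List.length_cons, List.length_nil]
      have hr : pvDFS (pvAdj edges) (f + 1) s stack =
          pvDFS (pvAdj edges) f
            ((PySem.Dict.getD (pvAdj edges) v []).foldl pvVisit (s, stack.dropLast)).1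
            ((PySem.Dict.getD (pvAdj edges) v []).foldl pvVisit (s, stack.dropLast)).2 := by
        simp [pvDFS, hstack]
      have hend : ∀ w ∈ PySem.Dict.getD (pvAdj edges) v [],
          w ∈ edges.flatMap (fun e => [e.1, e.2]) :=
        fun w hw => pvAdj_endpoint edges v w hw
      have hmeas := pvVisit_measure edges (PySem.Dict.getD (pvAdj edges) v []) s stack.dropLast hend
      have hsound' : ∀ x ∈ ((PySem.Dict.getD (pvAdj edges) v []).foldl pvVisit (s, stack.dropLast)).1,
          pvReach seeds edges x := by
        intro x hx
        rcases pvVisit_mem2 _ s stack.dropLast x hx with h | h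
        · exact hsound x h
        · rcases (pvAdj_mem edges v x).mp h with he | he
          · exact pvReach.fwd v x hRv he
          · exact pvReach.bwd x v hRv he
      have hsub' : ∀ x ∈ ((PySem.Dict.getD (pvAdj edges) v []).foldl pvVisit (s, stack.dropLast)).2,
          x ∈ ((PySem.Dict.getD (pvAdj edges) v []).foldl pvVisit (s, stack.dropLast)).1 := by
        intro x hx
        rcases pvVisit_st2 _ s stack.dropLast x hx with h | h
        · exact pvVisit_mem1 _ s stack.dropLast x
            (hsub x (by rw [← hdecomp]; exact List.mem_append_left _ h))
        · exact h
      have hnodup' : ((PySem.Dict.getD (pvAdj edges) v []).foldl pvVisit (s, stack.dropLast)).1.Nodup :=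
        pvVisit_nodup _ s stack.dropLast hnodup
      have hinv' : ∀ v' ∈ ((PySem.Dict.getD (pvAdj edges) v []).foldl pvVisit (s, stack.dropLast)).1,
          v' ∉ ((PySem.Dict.getD (pvAdj edges) v []).foldl pvVisit (s, stack.dropLast)).2 →
          ∀ w ∈ PySem.Dict.getD (pvAdj edges) v' [],
            w ∈ ((PySem.Dict.getD (pvAdj edges) v []).foldl pvVisit (s, stack.dropLast)).1 := by
        intro v' hv1 hv2 w hw
        have hv's : v' ∈ s := by
          rcases pvVisit_new _ s stack.dropLast v' hv1 with h | h
          · exact h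
          · exact absurd h hv2
        by_cases hvv : v' = v
        · subst hvv
          exact pvVisit_nbrs _ s stack.dropLast w hw
        · have hv'stack : v' ∉ stack := by
            intro hmem
            rw [← hdecomp] at hmem
            rcases List.mem_append.mp hmem with h | h
            · exact hv2 (pvVisit_st1 _ s stack.dropLast v' h)
            · exact hvv (List.mem_singleton.mp h)
          exact pvVisit_mem1 _ s stack.dropLast w (hinv v' hv's hv'stack w hw)
      obtain ⟨c1, c2, c3, c4⟩ := ih _ _ (by omega) hsound' hsub' hnodup' hinv'
      rw [hr]
      exact ⟨fun x hx => c1 x (pvVisit_mem1 _ s stack.dropLast x hx), c2, c3, c4⟩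

-- B's result contains every reachable ID
theorem pvB_complete (seeds : List String) (edges : List (String × String))
    (r : PySem.Set String)
    (hclosed : ∀ v ∈ r, ∀ w ∈ PySem.Dict.getD (pvAdj edges) v [], w ∈ r)
    (hseed : ∀ x ∈ seeds, x ∈ r) :
    ∀ x, pvReach seeds edges x → x ∈ r := by
  intro x hx
  induction hx with
  | seed x hx => exact hseed x hx
  | fwd a b _ he ih =>
    exact hclosed a ih b ((pvAdj_mem edges a b).mpr (Or.inl he))
  | bwd a b _ he ih =>
    exact hclosed b ih a ((pvAdj_mem edges b a).mpr (Or.inr he))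

-- ===== VERDICT (by name: the statement is the Claim_ definition above) =====
theorem expand_canonical_aliases_py_spec : Claim_equal_expand_canonical_aliases_py := by
  intro seed_ids intent_to_fill _
  unfold Spec_expand_canonical_aliases_py expand_canonical_aliases_py expand_canonical_aliases_py_alt
  set seeds := seed_ids.filter (fun x => x ≠ "") with hseeds
  set edges := intent_to_fill with hedges
  obtain ⟨hAmem, hAnodup⟩ := pvA_char seeds edges
  set rA := if edges = [] then PySem.Set.ofList seeds
            else pvLoopA edges (2 * edges.length + 1) (PySem.Set.ofList seeds) with hrA
  set rB := pvDFS (pvAdj edges) (seed_ids.length + 4 * edges.length + 1)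
      (PySem.Set.ofList seeds) seeds with hrB
  have hfuel : seeds.length + 2 * pvMissing edges (PySem.Set.ofList seeds) <
      seed_ids.length + 4 * edges.length + 1 := by
    have h1 : seeds.length ≤ seed_ids.length := List.length_filter_le _ _
    have h2 := pvMissing_le edges (PySem.Set.ofList seeds)
    omega
  obtain ⟨b1, b2, b3, b4⟩ := pvDFS_main seeds edges (seed_ids.length + 4 * edges.length + 1)
    (PySem.Set.ofList seeds) seeds hfuel
    (fun x hx => pvReach.seed x ((pvMemOfList seeds x).mp hx))
    (fun x hx => (pvMemOfList seeds x).mpr hx)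
    (PySem.Set.nodup_ofList seeds)
    (fun v hv hvst => absurd ((pvMemOfList seeds v).mp hv) hvst)
  have hBmem : ∀ x, x ∈ rB ↔ pvReach seeds edges x := by
    intro x
    exact ⟨fun hx => b2 x hx,
      fun hx => pvB_complete seeds edges rB b4
        (fun y hy => b1 y ((pvMemOfList seeds y).mpr hy)) x hx⟩
  have hperm : rA.Perm rB := by
    refine (List.perm_ext_iff_of_nodup hAnodup b3).mpr ?_
    intro x
    rw [hAmem x, hBmem x]
  exact PySem.List.sorted_eq_sorted_of_perm rA rB (fun x => x) (fun _ _ h => h) hperm
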